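-- pv_equiv track=rewrite | github.com/Skyedge1903/Dev_wumpus_ | Dev_wumpus_v2.0.py | init_jeu_sat
-- ===== SOURCE A (Python) =====
-- def init_jeu_sat(taille):
--     etat_0 = ['S', 'B', 'G', 'R']
--     etat = ['W', 'S', 'P', 'B', 'G', 'R']
--     ma_dimension = {}
--     for i in range(taille):
--         for j in range(taille):
--             name = chr(i + ord('A')) + chr(j + ord('1'))
--             if j != 0 and i != 0:
--                 ma_dimension[name] = {name + "_" + e for e in etat_0}
--             else:
--                 ma_dimension[name] = {name + "_" + e for e in etat}
--     return ma_dimension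
-- ===== SOURCE B (Python) =====
-- def init_jeu_sat(taille):
--     etat_0 = ['S', 'B', 'G', 'R']
--     etat = ['W', 'S', 'P', 'B', 'G', 'R']
--     names = [chr(i + 65) + chr(j + 49)
--              for i in range(taille) for j in range(taille)]
--     ma_dimension = {name: {name + "_" + e for e in etat_0} for name in names}
--     border = [chr(65) + chr(j + 49) for j in range(taille)] + \
--              [chr(i + 65) + chr(49) for i in range(1, taille)]
--     for name in border:
--         ma_dimension[name] = {name + "_" + e for e in etat}
--     return ma_dimension
-- ===== Notes on version B (the rewrite author's own statement) =====
-- stated objective: alternative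
-- what changed: A decides per cell inside one nested loop which state list to use; B builds a flat name list, gives every cell the interior state set via a dict comprehension, then overwrites exactly the border cells (row A and column 1, enumerated directly) with the full state set in a second pass.
import Mathlib
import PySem

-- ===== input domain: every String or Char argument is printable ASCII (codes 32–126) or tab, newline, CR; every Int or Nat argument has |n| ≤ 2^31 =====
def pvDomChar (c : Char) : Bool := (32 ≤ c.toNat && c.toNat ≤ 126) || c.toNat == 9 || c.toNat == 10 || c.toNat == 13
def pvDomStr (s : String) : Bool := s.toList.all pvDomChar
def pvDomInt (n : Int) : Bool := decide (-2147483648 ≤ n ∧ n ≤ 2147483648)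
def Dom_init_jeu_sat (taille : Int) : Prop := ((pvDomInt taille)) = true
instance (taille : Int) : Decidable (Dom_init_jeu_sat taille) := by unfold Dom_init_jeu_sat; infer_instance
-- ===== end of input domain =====

-- B restructures A's single nested loop with a per-cell branch into: one dict comprehension giving
-- every cell the interior state set, then a second pass over the directly enumerated border cells
-- (row 'A' and column '1') overwriting them with the full state set; same return value.

-- ===== PORT A =====
-- chr(i + 65) + chr(j + 49): two single code points concatenated (exact where both code points are valid scalar values)
def pvName (i j : Int) : String := String.ofList [Char.ofNat (i + 65).toNat, Char.ofNat (j + 49).toNat]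

-- the set comprehension {name + "_" + e for e in es} (both Pythons build their set values this way)
def pvStates (name : String) (es : List String) : List String :=
  PySem.Set.ofList (es.map (fun e => name ++ "_" ++ e))

def init_jeu_sat (taille : Int) : List (String × List String) :=
  let etat_0 := ["S", "B", "G", "R"]
  let etat := ["W", "S", "P", "B", "G", "R"]
  let ma_dimension :=
    (PySem.List.pyRange 0 taille 1).foldl (fun d i =>
      (PySem.List.pyRange 0 taille 1).foldl (fun d j =>
        let name := pvName i j
        if j ≠ 0 ∧ i ≠ 0 then d.insert name (pvStates name etat_0)
        else d.insert name (pvStates name etat)) d)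
      (PySem.Dict.empty : PySem.Dict String (List String))
  ma_dimension.items

-- ===== PORT B =====
def init_jeu_sat_alt (taille : Int) : List (String × List String) :=
  let etat_0 := ["S", "B", "G", "R"]
  let etat := ["W", "S", "P", "B", "G", "R"]
  let names := (PySem.List.pyRange 0 taille 1).flatMap (fun i =>
      (PySem.List.pyRange 0 taille 1).map (fun j => pvName i j))
  let ma_dimension := names.foldl
      (fun d name => d.insert name (pvStates name etat_0))
      (PySem.Dict.empty : PySem.Dict String (List String))
  let border := (PySem.List.pyRange 0 taille 1).map (fun j => pvName 0 j)
             ++ (PySem.List.pyRange 1 taille 1).map (fun i => pvName i 0)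
  (border.foldl (fun d name => d.insert name (pvStates name etat)) ma_dimension).items

-- ===== PRECONDITION & SPEC =====
def Spec_init_jeu_sat (taille : Int) (out : List (String × List String)) : Prop := out = init_jeu_sat_alt taille
instance (taille : Int) (out : List (String × List String)) : Decidable (Spec_init_jeu_sat taille out) := by unfold Spec_init_jeu_sat; infer_instance

-- ===== CLAIM (what is proved, stated in full; the proofs are below) =====
def Claim_equal_init_jeu_sat : Prop := ∀ (taille : Int), Dom_init_jeu_sat taille → Spec_init_jeu_sat taille (init_jeu_sat taille)

-- ===== LEMMAS AND PROOFS =====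

-- proof-side abbreviations
def pvNames (taille : Int) : List String :=
  (PySem.List.pyRange 0 taille 1).flatMap (fun i =>
    (PySem.List.pyRange 0 taille 1).map (fun j => pvName i j))

def pvBorder (taille : Int) : List String :=
  (PySem.List.pyRange 0 taille 1).map (fun j => pvName 0 j)
    ++ (PySem.List.pyRange 1 taille 1).map (fun i => pvName i 0)

def pvVal (taille : Int) (n : String) : List String :=
  if n ∈ pvBorder taille then pvStates n ["W", "S", "P", "B", "G", "R"]
  else pvStates n ["S", "B", "G", "R"]

theorem pv_char_ne65 (n : Nat) (h : 66 ≤ n) : Char.ofNat n ≠ Char.ofNat 65 := by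
  intro heq
  have h2 : (Char.ofNat n).toNat = 65 := by rw [heq]; decide
  unfold Char.ofNat at h2
  split at h2
  · simp [Char.ofNatAux, Char.toNat] at h2; omega
  · simp [Char.toNat] at h2

theorem pv_char_ne49 (n : Nat) (h : 50 ≤ n) : Char.ofNat n ≠ Char.ofNat 49 := by
  intro heq
  have h2 : (Char.ofNat n).toNat = 49 := by rw [heq]; decide
  unfold Char.ofNat at h2
  split at h2
  · simp [Char.ofNatAux, Char.toNat] at h2; omega
  · simp [Char.toNat] at h2

theorem pv_name_fst (i j i' j' : Int) (hi : 1 ≤ i) (hi' : i' = 0)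
    (h : pvName i j = pvName i' j') : False := by
  subst hi'
  have h1 := congrArg String.toList h
  simp only [pvName, String.toList_ofList, List.cons.injEq] at h1
  exact pv_char_ne65 (i + 65).toNat (by omega) (by simpa using h1.1)

theorem pv_name_snd (i j i' j' : Int) (hj : 1 ≤ j) (hj' : j' = 0)
    (h : pvName i j = pvName i' j') : False := by
  subst hj'
  have h1 := congrArg String.toList h
  simp only [pvName, String.toList_ofList, List.cons.injEq] at h1
  exact pv_char_ne49 (j + 49).toNat (by omega) (by simpa using h1.2.1)

theorem pv_mem_border_iff (taille i j : Int)
    (hi0 : 0 ≤ i) (hi1 : i < taille) (hj0 : 0 ≤ j) (hj1 : j < taille) :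
    pvName i j ∈ pvBorder taille ↔ (i = 0 ∨ j = 0) := by
  constructor
  · intro hmem
    by_contra hc
    push Not at hc
    simp only [pvBorder, List.mem_append, List.mem_map, PySem.List.mem_pyRange_one] at hmem
    rcases hmem with ⟨j', _, hEq⟩ | ⟨i', _, hEq⟩
    · exact pv_name_fst i j 0 j' (by omega) rfl hEq.symm
    · exact pv_name_snd i j i' 0 (by omega) rfl hEq.symm
  · intro h
    simp only [pvBorder, List.mem_append, List.mem_map, PySem.List.mem_pyRange_one]
    rcases h with h | h
    · subst h; exact Or.inl ⟨j, ⟨hj0, hj1⟩, rfl⟩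
    · subst h
      by_cases hi : i = 0
      · subst hi; exact Or.inl ⟨0, ⟨le_refl 0, hi1⟩, rfl⟩
      · exact Or.inr ⟨i, ⟨by omega, hi1⟩, rfl⟩

theorem pv_border_subset (taille : Int) : ∀ n ∈ pvBorder taille, n ∈ pvNames taille := by
  intro n hn
  simp only [pvBorder, List.mem_append, List.mem_map, PySem.List.mem_pyRange_one] at hn
  simp only [pvNames, List.mem_flatMap, List.mem_map, PySem.List.mem_pyRange_one]
  rcases hn with ⟨j, hj, hEq⟩ | ⟨i, hi, hEq⟩
  · exact ⟨0, ⟨le_refl 0, by omega⟩, j, hj, hEq⟩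
  · exact ⟨i, ⟨by omega, hi.2⟩, 0, ⟨le_refl 0, by omega⟩, hEq⟩

-- the value looked up after a loop of inserts whose value is a function of the key
theorem pv_getD_foldl {α : Type} (l : List α) (key : α → String) (V : String → List String)
    (d : PySem.Dict String (List String)) (k : String) (dflt : List String) :
    (l.foldl (fun d a => d.insert (key a) (V (key a))) d).getD k dflt
      = if k ∈ l.map key then V k else d.getD k dflt := by
  induction l generalizing d with
  | nil => simp
  | cons a t ih =>
    simp only [List.foldl_cons, List.map_cons, List.mem_cons]
    rw [ih]
    by_cases h : k ∈ t.map key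
    · simp [h]
    · rw [PySem.Dict.getD_insert]
      by_cases h2 : k = key a <;> simp [h, h2]

-- items of such a loop started on the empty dict
theorem pv_items_foldl {α : Type} (l : List α) (key : α → String) (V : String → List String) :
    (l.foldl (fun d a => d.insert (key a) (V (key a)))
        (PySem.Dict.empty : PySem.Dict String (List String))).items
      = (PySem.Set.ofList (l.map key)).map (fun k => (k, V k)) := by
  have hnd := PySem.Dict.nodup_keys_foldl_insert_key l key (fun _ a => V (key a))
    (PySem.Dict.empty : PySem.Dict String (List String)) (by simp)
  rw [PySem.Dict.items_eq_map_keys _ hnd []]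
  have hk := PySem.Dict.keys_foldl_insert_key l key (fun _ a => V (key a))
    (PySem.Dict.empty : PySem.Dict String (List String))
  rw [hk]
  simp only [PySem.Dict.keys_empty, PySem.Set.update_nil_left]
  apply List.map_congr_left
  intro k hkmem
  have hmem : k ∈ l.map key := (PySem.Set.mem_ofList _ _).mp hkmem
  rw [pv_getD_foldl]
  simp [hmem]


theorem pv_getD_foldl' (l : List String) (V : String → List String)
    (d : PySem.Dict String (List String)) (k : String) (dflt : List String) :
    (l.foldl (fun d n => d.insert n (V n)) d).getD k dflt
      = if k ∈ l then V k else d.getD k dflt := by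
  have := pv_getD_foldl l (fun x => x) V d k dflt
  simpa [List.map_id'] using this

theorem pv_keys_foldl (l : List String) (V : String → List String)
    (d : PySem.Dict String (List String)) :
    (l.foldl (fun d n => d.insert n (V n)) d).keys = PySem.Set.update d.keys l := by
  have := PySem.Dict.keys_foldl_insert_key l (fun x => x) (fun _ a => V a) d
  simpa [List.map_id'] using this

theorem pv_nodup_foldl (l : List String) (V : String → List String)
    (d : PySem.Dict String (List String)) (h : d.keys.Nodup) :
    (l.foldl (fun d n => d.insert n (V n)) d).keys.Nodup :=
  PySem.Dict.nodup_keys_foldl_insert_key l (fun x => x) (fun _ a => V a) d h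

-- a base pass over all of L then an overwrite pass over B ⊆ L
theorem pv_two_phase (L B : List String) (V1 V2 : String → List String)
    (hBL : ∀ n ∈ B, n ∈ L) :
    (B.foldl (fun d n => d.insert n (V2 n))
        (L.foldl (fun d n => d.insert n (V1 n))
          (PySem.Dict.empty : PySem.Dict String (List String)))).items
      = (PySem.Set.ofList L).map (fun k => (k, if k ∈ B then V2 k else V1 k)) := by
  have hnd1 : ((L.foldl (fun d n => d.insert n (V1 n))
      (PySem.Dict.empty : PySem.Dict String (List String)))).keys.Nodup :=
    pv_nodup_foldl _ _ _ (by simp)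
  have hk1 : ((L.foldl (fun d n => d.insert n (V1 n))
      (PySem.Dict.empty : PySem.Dict String (List String)))).keys = PySem.Set.ofList L := by
    rw [pv_keys_foldl]
    simp [PySem.Set.update_nil_left]
  have hnd2 := pv_nodup_foldl B V2 _ hnd1
  rw [PySem.Dict.items_eq_map_keys _ hnd2 [], pv_keys_foldl, hk1,
      PySem.Set.update_eq_append_filter]
  have hfil : List.filter (fun y => !(PySem.Set.ofList L).contains y)
      (PySem.Set.ofList B) = [] := by
    rw [List.filter_eq_nil_iff]
    intro y hy
    have hyb : y ∈ B := (PySem.Set.mem_ofList _ _).mp hy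
    have hyn : y ∈ PySem.Set.ofList L := (PySem.Set.mem_ofList _ _).mpr (hBL y hyb)
    simp [PySem.Set.contains] at *
    simpa using hyn
  rw [hfil, List.append_nil]
  apply List.map_congr_left
  intro k hk
  have hkL : k ∈ L := (PySem.Set.mem_ofList _ _).mp hk
  rw [pv_getD_foldl', pv_getD_foldl']
  simp [hkL]

theorem pv_A_eq (taille : Int) :
    init_jeu_sat taille = (PySem.Set.ofList (pvNames taille)).map (fun k => (k, pvVal taille k)) := by
  show ((PySem.List.pyRange 0 taille 1).foldl (fun d i =>
      (PySem.List.pyRange 0 taille 1).foldl (fun d j =>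
        if j ≠ 0 ∧ i ≠ 0 then d.insert (pvName i j) (pvStates (pvName i j) ["S", "B", "G", "R"])
        else d.insert (pvName i j) (pvStates (pvName i j) ["W", "S", "P", "B", "G", "R"])) d)
      (PySem.Dict.empty : PySem.Dict String (List String))).items = _
  have hP : ((PySem.List.pyRange 0 taille 1).flatMap (fun i =>
        (PySem.List.pyRange 0 taille 1).map (fun j => (i, j)))).foldl
        (fun d (p : Int × Int) =>
          if p.2 ≠ 0 ∧ p.1 ≠ 0 then d.insert (pvName p.1 p.2) (pvStates (pvName p.1 p.2) ["S", "B", "G", "R"])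
          else d.insert (pvName p.1 p.2) (pvStates (pvName p.1 p.2) ["W", "S", "P", "B", "G", "R"]))
        (PySem.Dict.empty : PySem.Dict String (List String))
      = (PySem.List.pyRange 0 taille 1).foldl (fun d i =>
          (PySem.List.pyRange 0 taille 1).foldl (fun d j =>
            if j ≠ 0 ∧ i ≠ 0 then d.insert (pvName i j) (pvStates (pvName i j) ["S", "B", "G", "R"])
            else d.insert (pvName i j) (pvStates (pvName i j) ["W", "S", "P", "B", "G", "R"])) d)
          (PySem.Dict.empty : PySem.Dict String (List String)) := by
    rw [List.foldl_flatMap]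
    simp only [List.foldl_map]
  rw [← hP]
  rw [PySem.List.foldl_congr_mem' _ _
    (fun d (p : Int × Int) => d.insert (pvName p.1 p.2) (pvVal taille (pvName p.1 p.2))) _ ?_]
  · rw [pv_items_foldl _ (fun p : Int × Int => pvName p.1 p.2) (pvVal taille)]
    congr 1
    simp only [pvNames, List.map_flatMap, List.map_map]
    rfl
  · intro p hp acc
    simp only [List.mem_flatMap, List.mem_map, PySem.List.mem_pyRange_one] at hp
    obtain ⟨i, hi, j, hj, hpe⟩ := hp
    subst hpe
    have hb := pv_mem_border_iff taille i j hi.1 hi.2 hj.1 hj.2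
    by_cases hc : i = 0 ∨ j = 0
    · have h1 : ¬ (j ≠ 0 ∧ i ≠ 0) := by tauto
      simp only [pvVal, if_neg h1, if_pos (hb.mpr hc)]
    · have h1 : (j ≠ 0 ∧ i ≠ 0) := by tauto
      have h2 : pvName i j ∉ pvBorder taille := fun hm => hc (hb.mp hm)
      simp only [pvVal, if_pos h1, if_neg h2]

theorem pv_B_eq (taille : Int) :
    init_jeu_sat_alt taille = (PySem.Set.ofList (pvNames taille)).map (fun k => (k, pvVal taille k)) := by
  show ((pvBorder taille).foldl
      (fun d n => d.insert n (pvStates n ["W", "S", "P", "B", "G", "R"]))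
      ((pvNames taille).foldl
        (fun d n => d.insert n (pvStates n ["S", "B", "G", "R"]))
        (PySem.Dict.empty : PySem.Dict String (List String)))).items = _
  rw [pv_two_phase _ _ _ _ (pv_border_subset taille)]
  simp only [pvVal]

-- ===== VERDICT (by name: the statement is the Claim_ definition above) =====
theorem init_jeu_sat_spec : Claim_equal_init_jeu_sat := by
  intro taille _
  unfold Spec_init_jeu_sat
  rw [pv_A_eq, pv_B_eq]
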